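-- pv_equiv track=rewrite | github.com/grymmjack/DRAW | UTILS/align-qb64pe.py | process_lines_compact
-- ===== SOURCE A (Python) =====
-- def find_comment_pos(line: str) -> int:
--     """Return the index of the inline comment apostrophe, or -1 if none.
--
--     Handles QB64 string literals (delimited by ") where "" is a literal
--     double-quote.  A ' inside a string is NOT a comment marker.
--
--     A line whose very first non-space character is ' is a pure comment line;
--     this function returns -1 for those (callers treat them as group breakers).
--     """
--     stripped = line.lstrip()
--     if stripped.startswith("'") or stripped.upper().startswith("REM "):
--         return -1  # pure comment / REM line
--
--     in_string = False
--     i = 0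
--     while i < len(line):
--         ch = line[i]
--         if ch == '"':
--             if in_string:
--                 # "" inside a string = escaped quote, skip both
--                 if i + 1 < len(line) and line[i + 1] == '"':
--                     i += 2
--                     continue
--                 in_string = False
--             else:
--                 in_string = True
--         elif ch == "'" and not in_string:
--             return i
--         i += 1
--     return -1  # no inline comment
--
-- def get_ending(line: str) -> str:
--     if line.endswith('\r\n'):
--         return '\r\n'
--     if line.endswith('\n'):
--         return '\n'
--     if line.endswith('\r'):
--         return '\r'
--     return ''
--
-- def process_lines_compact(lines: list[str], min_gap: int) -> tuple[list[str], int]: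
--     """Strip extra whitespace before each inline comment to exactly min_gap spaces."""
--     result = []
--     changed = 0
--     gap = ' ' * min_gap
--
--     for orig in lines:
--         raw = orig.rstrip('\n').rstrip('\r')
--         pos = find_comment_pos(raw)
--         if pos == -1:
--             # No inline comment — strip trailing whitespace only
--             stripped = raw.rstrip()
--             new_line = stripped + get_ending(orig)
--             if new_line != orig:
--                 changed += 1
--             result.append(new_line)
--         else:
--             code_part = raw[:pos].rstrip()
--             comment_part = raw[pos:]
--             new_line = code_part + gap + comment_part + get_ending(orig)
--             if new_line != orig:
--                 changed += 1
--             result.append(new_line)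
--
--     return result, changed
-- ===== SOURCE B (Python) =====
-- def _comment_pos(line: str) -> int:
--     """Index of the inline comment apostrophe, or -1.
--
--     Split the line on '"'.  Segments with even index lie outside string
--     literals (each quote toggles string state; a "" escape is two toggles,
--     i.e. a no-op, and an unterminated literal is a single trailing odd
--     segment).  The comment marker is the first apostrophe found in an
--     even segment.
--     """
--     stripped = line.lstrip()
--     if stripped.startswith("'") or stripped.upper().startswith('REM '):
--         return -1
--     offset = 0
--     for idx, seg in enumerate(line.split('"')):
--         if idx % 2 == 0 and "'" in seg:
--             return offset + seg.index("'")
--         offset += len(seg) + 1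
--     return -1
--
--
-- def _ending(line: str) -> str:
--     return next((e for e in ('\r\n', '\n', '\r') if line.endswith(e)), '')
--
--
-- def _fix(orig: str, gap: str) -> str:
--     raw = orig.rstrip('\n').rstrip('\r')
--     pos = _comment_pos(raw)
--     if pos < 0:
--         return raw.rstrip() + _ending(orig)
--     return raw[:pos].rstrip() + gap + raw[pos:] + _ending(orig)
--
--
-- def process_lines_compact(lines: list, min_gap: int) -> tuple:
--     """Strip extra whitespace before each inline comment to exactly min_gap spaces."""
--     gap = ' ' * min_gap
--     new_lines = [_fix(line, gap) for line in lines]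
--     return new_lines, sum(1 for a, b in zip(lines, new_lines) if a != b)
-- ===== Notes on version B (the rewrite author's own statement) =====
-- stated objective: alternative
-- what changed: find_comment_pos's per-character in_string state machine (with explicit "" escape skipping) is replaced by splitting the line on '"' and searching only even-indexed segments (which lie outside string literals, since "" is two toggles = a no-op), and the main loop's single fold with two accumulators is replaced by a map producing the new lines plus a zip-count of changed lines.
import Mathlib
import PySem

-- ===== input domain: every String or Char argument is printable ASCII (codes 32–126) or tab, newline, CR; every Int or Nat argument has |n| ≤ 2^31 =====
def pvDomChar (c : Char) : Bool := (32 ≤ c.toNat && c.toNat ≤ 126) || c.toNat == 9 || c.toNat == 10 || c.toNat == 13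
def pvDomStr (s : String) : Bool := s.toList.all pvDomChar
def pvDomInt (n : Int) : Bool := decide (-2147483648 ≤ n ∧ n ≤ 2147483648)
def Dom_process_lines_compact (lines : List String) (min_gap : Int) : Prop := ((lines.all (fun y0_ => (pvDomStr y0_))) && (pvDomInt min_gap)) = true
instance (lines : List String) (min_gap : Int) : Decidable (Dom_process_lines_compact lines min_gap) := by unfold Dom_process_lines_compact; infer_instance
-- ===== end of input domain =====

-- B replaces the per-character in_string scanner by a split-on-quote parity search and the
-- two-accumulator fold by map + zip-count: an alternative decomposition of equal cost.


-- ===== PORT A =====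
-- the while loop of find_comment_pos: chars left to scan, in_string flag, current index
def findLoopA (cs : List Char) (inStr : Bool) (i : Int) : Int :=
  match cs with
  | [] => -1
  | c :: rest =>
    if c = '"' then
      if inStr then
        -- "" escape (i + 1 < len(line) and line[i+1] == '"'): skip both
        if rest.head? = some '"' then findLoopA rest.tail true (i + 2)
        else findLoopA rest false (i + 1)
      else findLoopA rest true (i + 1)
    else if c = '\'' ∧ inStr = false then i
    else findLoopA rest inStr (i + 1)
termination_by cs.length
decreasing_by all_goals simp [List.length_tail]

def findCommentPosA (line : List Char) : Int :=
  let stripped := PySem.Chars.lstrip line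
  if PySem.Chars.startswith stripped ['\''] ||
     PySem.Chars.startswith (PySem.Chars.upper stripped) ['R', 'E', 'M', ' '] then -1
  else findLoopA line false 0

-- hand port of s.rstrip('\n') / s.rstrip('\r') (single-char strip set): exact
def rstripNL (cs : List Char) : List Char := (cs.reverse.dropWhile (fun c => c = '\n')).reverse
def rstripCR (cs : List Char) : List Char := (cs.reverse.dropWhile (fun c => c = '\r')).reverse

def getEnding (line : List Char) : List Char :=
  if PySem.Chars.endswith line ['\r', '\n'] then ['\r', '\n']
  else if PySem.Chars.endswith line ['\n'] then ['\n']
  else if PySem.Chars.endswith line ['\r'] then ['\r']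
  else []

def process_lines_compact (lines : List String) (min_gap : Int) : List String × Int :=
  let gap : List Char := List.replicate min_gap.toNat ' '   -- ' ' * min_gap ('' for negative)
  let step := fun (acc : List String × Int) (orig : String) =>
    let raw := rstripCR (rstripNL orig.toList)
    let pos := findCommentPosA raw
    if pos = -1 then
      let stripped := PySem.Chars.rstrip raw
      let newLine := stripped ++ getEnding orig.toList
      (acc.1 ++ [String.ofList newLine], if newLine ≠ orig.toList then acc.2 + 1 else acc.2)
    else
      let codePart := PySem.Chars.rstrip (PySem.List.slice raw none (some pos))
      let commentPart := PySem.List.slice raw (some pos) none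
      let newLine := codePart ++ gap ++ commentPart ++ getEnding orig.toList
      (acc.1 ++ [String.ofList newLine], if newLine ≠ orig.toList then acc.2 + 1 else acc.2)
  lines.foldl step ([], 0)

-- ===== PORT B =====
-- hand port of line.split('"') (one-char separator): exact
def splitQ : List Char → List (List Char)
  | [] => [[]]
  | c :: cs =>
    if c = '"' then [] :: splitQ cs
    else
      match splitQ cs with
      | h :: t => (c :: h) :: t
      | [] => [[c]]

-- the for-loop over enumerate(line.split('"')): segment list, enumerate index, running offset
def segScan : List (List Char) → Nat → Int → Int
  | [], _, _ => -1
  | seg :: rest, idx, off =>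
    if idx % 2 = 0 ∧ '\'' ∈ seg then off + (seg.idxOf '\'' : Int)
    else segScan rest (idx + 1) (off + seg.length + 1)

def commentPosB (line : List Char) : Int :=
  let stripped := PySem.Chars.lstrip line
  if PySem.Chars.startswith stripped ['\''] ||
     PySem.Chars.startswith (PySem.Chars.upper stripped) ['R', 'E', 'M', ' '] then -1
  else segScan (splitQ line) 0 0

-- hand port of s.rstrip(c) for one char c (B trims both EOL chars through one helper)
def dropTrailing (c : Char) (cs : List Char) : List Char :=
  (cs.reverse.dropWhile (fun d => d = c)).reverse

-- next((e for e in ('\r\n','\n','\r') if line.endswith(e)), '')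
def endingB (line : List Char) : List Char :=
  (([['\r', '\n'], ['\n'], ['\r']].find? (fun e => PySem.Chars.endswith line e)).getD [])

def fixLine (orig : List Char) (gap : List Char) : List Char :=
  let raw := dropTrailing '\r' (dropTrailing '\n' orig)
  let pos := commentPosB raw
  if pos < 0 then PySem.Chars.rstrip raw ++ endingB orig
  else
    PySem.Chars.rstrip (PySem.List.slice raw none (some pos)) ++ gap ++
      PySem.List.slice raw (some pos) none ++ endingB orig

def process_lines_compact_alt (lines : List String) (min_gap : Int) : List String × Int :=
  let gap : List Char := List.replicate min_gap.toNat ' '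
  let newLines := lines.map (fun l => String.ofList (fixLine l.toList gap))
  (newLines, ((lines.zip newLines).countP (fun p => p.1.toList ≠ p.2.toList) : Int))

-- ===== PRECONDITION & SPEC =====
def Spec_process_lines_compact (lines : List String) (min_gap : Int) (out : List String × Int) : Prop := out = process_lines_compact_alt lines min_gap
instance (lines : List String) (min_gap : Int) (out : List String × Int) : Decidable (Spec_process_lines_compact lines min_gap out) := by unfold Spec_process_lines_compact; infer_instance

-- ===== CLAIM (what is proved, stated in full; the proofs are below) =====
def Claim_equal_process_lines_compact : Prop := ∀ (lines : List String) (min_gap : Int), Dom_process_lines_compact lines min_gap → Spec_process_lines_compact lines min_gap (process_lines_compact lines min_gap)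

-- ===== LEMMAS AND PROOFS =====

lemma splitQ_ne_nil (cs : List Char) : splitQ cs ≠ [] := by
  cases cs with
  | nil => simp [splitQ]
  | cons c cs =>
    simp only [splitQ]
    split
    · simp
    · cases h : splitQ cs <;> simp

lemma segScan_parity (l : List (List Char)) : ∀ (idx : Nat) (off : Int),
    segScan l (idx + 2) off = segScan l idx off := by
  induction l with
  | nil => intro idx off; rfl
  | cons seg rest ih =>
    intro idx off
    simp only [segScan, Nat.add_mod_right]
    split
    · rfl
    · exact ih (idx + 1) _

lemma splitQ_quote (cs : List Char) : splitQ ('"' :: cs) = [] :: splitQ cs := by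
  simp [splitQ]

lemma splitQ_other (c : Char) (cs : List Char) (h : List Char) (t : List (List Char))
    (hq : c ≠ '"') (hs : splitQ cs = h :: t) : splitQ (c :: cs) = (c :: h) :: t := by
  simp [splitQ, hq, hs]

-- the core: A's in_string scanner equals B's split-parity scan
lemma scan_eq (cs : List Char) (b : Bool) (i : Int) :
    findLoopA cs b i = segScan (splitQ cs) (cond b 1 0) i := by
  fun_induction findLoopA cs b i with
  | case1 b i => cases b <;> simp [segScan, splitQ]
  | case2 i rest h ih =>
    obtain ⟨r, rfl⟩ : ∃ r, rest = '"' :: r := by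
      cases rest with
      | nil => simp at h
      | cons d r => simp at h; exact ⟨r, by rw [h]⟩
    simp only [List.tail_cons, Bool.cond_true] at ih ⊢
    rw [splitQ_quote, splitQ_quote]
    rw [show segScan ([] :: [] :: splitQ r) 1 i = segScan (splitQ r) 3 (i + 1 + 1) by
      simp [segScan]]
    rw [show (3 : Nat) = 1 + 2 from rfl, segScan_parity, show i + 1 + 1 = i + 2 by ring]
    exact ih
  | case3 i rest h ih =>
    simp only [Bool.cond_true, Bool.cond_false] at ih ⊢
    rw [splitQ_quote]
    rw [show segScan ([] :: splitQ rest) 1 i = segScan (splitQ rest) 2 (i + 1) by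
      simp [segScan]]
    rw [show (2 : Nat) = 0 + 2 from rfl, segScan_parity]
    exact ih
  | case4 inStr i rest hb ih =>
    have hb' : inStr = false := by simpa using hb
    subst hb'
    simp only [Bool.cond_true, Bool.cond_false] at ih ⊢
    rw [splitQ_quote]
    rw [show segScan ([] :: splitQ rest) 0 i = segScan (splitQ rest) 1 (i + 1) by
      simp [segScan]]
    exact ih
  | case5 inStr i c rest hq hc =>
    obtain ⟨hc', hb⟩ := hc
    subst hc'; subst hb
    obtain ⟨h, t, hs⟩ : ∃ h t, splitQ rest = h :: t := by
      cases e : splitQ rest with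
      | nil => exact absurd e (splitQ_ne_nil rest)
      | cons a b => exact ⟨a, b, rfl⟩
    simp only [Bool.cond_false]
    rw [splitQ_other _ _ _ _ hq hs]
    rw [show segScan (('\'' :: h) :: t) 0 i = i + (('\'' :: h).idxOf '\'' : Int) by
      rw [segScan, if_pos ⟨by norm_num, List.mem_cons_self⟩]]
    simp
  | case6 inStr i c rest hq hc ih =>
    obtain ⟨h, t, hs⟩ : ∃ h t, splitQ rest = h :: t := by
      cases e : splitQ rest with
      | nil => exact absurd e (splitQ_ne_nil rest)
      | cons a b => exact ⟨a, b, rfl⟩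
    rw [splitQ_other _ _ _ _ hq hs, ih, hs]
    cases inStr with
    | true =>
      simp only [Bool.cond_true]
      rw [show segScan (h :: t) 1 (i + 1) = segScan t 2 (i + 1 + h.length + 1) by
            rw [segScan, if_neg (by norm_num)],
          show segScan ((c :: h) :: t) 1 i = segScan t 2 (i + (c :: h).length + 1) by
            rw [segScan, if_neg (by norm_num)]]
      congr 1
      push_cast [List.length_cons]
      ring
    | false =>
      have hc' : c ≠ '\'' := by intro hx; exact hc ⟨hx, rfl⟩
      simp only [Bool.cond_false]
      by_cases hm : '\'' ∈ h
      · rw [show segScan (h :: t) 0 (i + 1) = i + 1 + (h.idxOf '\'' : Int) by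
              rw [segScan, if_pos ⟨by norm_num, hm⟩],
            show segScan ((c :: h) :: t) 0 i = i + ((c :: h).idxOf '\'' : Int) by
              rw [segScan, if_pos ⟨by norm_num, List.mem_cons_of_mem _ hm⟩]]
        rw [List.idxOf_cons_ne h hc']
        push_cast
        ring
      · have hnc : ¬ ((0 : Nat) % 2 = 0 ∧ '\'' ∈ c :: h) := by
          rintro ⟨-, hmem⟩
          rcases List.mem_cons.mp hmem with h1 | h1
          · exact hc' h1.symm
          · exact hm h1
        rw [show segScan (h :: t) 0 (i + 1) = segScan t 1 (i + 1 + h.length + 1) by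
              rw [segScan, if_neg (by rintro ⟨-, hmem⟩; exact hm hmem)],
            show segScan ((c :: h) :: t) 0 i = segScan t 1 (i + (c :: h).length + 1) by
              rw [segScan, if_neg hnc]]
        congr 1
        push_cast [List.length_cons]
        ring
lemma findLoopA_lb (cs : List Char) (b : Bool) (i : Int) :
    findLoopA cs b i = -1 ∨ i ≤ findLoopA cs b i := by
  fun_induction findLoopA cs b i with
  | case1 b i => left; rfl
  | case2 i rest h ih => rcases ih with h' | h' <;> [left; right] <;> [exact h'; omega]
  | case3 i rest h ih => rcases ih with h' | h' <;> [left; right] <;> [exact h'; omega]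
  | case4 inStr i rest hb ih => rcases ih with h' | h' <;> [left; right] <;> [exact h'; omega]
  | case5 inStr i c rest hq hc => right; exact le_refl i
  | case6 inStr i c rest hq hc ih => rcases ih with h' | h' <;> [left; right] <;> [exact h'; omega]

lemma findCommentPosA_neg_iff (l : List Char) :
    (findCommentPosA l = -1) ↔ (findCommentPosA l < 0) := by
  unfold findCommentPosA
  by_cases hg : (PySem.Chars.startswith (PySem.Chars.lstrip l) ['\''] ||
      PySem.Chars.startswith (PySem.Chars.upper (PySem.Chars.lstrip l)) ['R', 'E', 'M', ' ']) = true
  · simp [hg]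
  · simp only [hg]
    rcases findLoopA_lb l false 0 with h | h
    · rw [h]; simp
    · constructor
      · intro h'; omega
      · intro h'; omega

lemma commentPos_eq (l : List Char) : findCommentPosA l = commentPosB l := by
  unfold findCommentPosA commentPosB
  by_cases hg : (PySem.Chars.startswith (PySem.Chars.lstrip l) ['\''] ||
      PySem.Chars.startswith (PySem.Chars.upper (PySem.Chars.lstrip l)) ['R', 'E', 'M', ' ']) = true
  · simp [hg]
  · simp only [hg]
    simpa using scan_eq l false 0

lemma dropNL_eq (cs : List Char) : dropTrailing '\n' cs = rstripNL cs := rfl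
lemma dropCR_eq (cs : List Char) : dropTrailing '\r' cs = rstripCR cs := rfl
lemma endingB_eq (l : List Char) : endingB l = getEnding l := by
  unfold endingB getEnding
  by_cases h1 : PySem.Chars.endswith l ['\r', '\n'] <;>
    by_cases h2 : PySem.Chars.endswith l ['\n'] <;>
      by_cases h3 : PySem.Chars.endswith l ['\r'] <;>
        simp [List.find?, h1, h2, h3]

-- A's per-line computation, named so the fold can be reasoned about
def stepA (gap : List Char) (acc : List String × Int) (orig : String) : List String × Int :=
  let raw := rstripCR (rstripNL orig.toList)
  let pos := findCommentPosA raw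
  if pos = -1 then
    let stripped := PySem.Chars.rstrip raw
    let newLine := stripped ++ getEnding orig.toList
    (acc.1 ++ [String.ofList newLine], if newLine ≠ orig.toList then acc.2 + 1 else acc.2)
  else
    let codePart := PySem.Chars.rstrip (PySem.List.slice raw none (some pos))
    let commentPart := PySem.List.slice raw (some pos) none
    let newLine := codePart ++ gap ++ commentPart ++ getEnding orig.toList
    (acc.1 ++ [String.ofList newLine], if newLine ≠ orig.toList then acc.2 + 1 else acc.2)

lemma stepA_eq (gap : List Char) (acc : List String × Int) (orig : String) :
    stepA gap acc orig =
      (acc.1 ++ [String.ofList (fixLine orig.toList gap)],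
       if fixLine orig.toList gap ≠ orig.toList then acc.2 + 1 else acc.2) := by
  unfold stepA fixLine
  simp only [dropNL_eq, dropCR_eq, endingB_eq, ← commentPos_eq]
  by_cases hp : findCommentPosA (rstripCR (rstripNL orig.toList)) = -1
  · simp [hp]
  · have hp' : ¬ findCommentPosA (rstripCR (rstripNL orig.toList)) < 0 := fun h =>
      hp ((findCommentPosA_neg_iff _).mpr h)
    simp [hp, hp', List.append_assoc]

lemma foldA (gap : List Char) (ls : List String) : ∀ (acc : List String × Int),
    ls.foldl (stepA gap) acc
      = (acc.1 ++ ls.map (fun l => String.ofList (fixLine l.toList gap)),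
         acc.2 + (((ls.zip (ls.map (fun l => String.ofList (fixLine l.toList gap)))).countP
             (fun p => decide (p.1.toList ≠ p.2.toList)) : Nat) : Int)) := by
  induction ls with
  | nil => intro acc; simp
  | cons l ls ih =>
    intro acc
    rw [List.foldl_cons, stepA_eq, ih]
    simp only [List.map_cons, List.zip_cons_cons, List.countP_cons, String.toList_ofList]
    rw [Prod.mk.injEq]
    refine ⟨by simp, ?_⟩
    rcases eq_or_ne (fixLine l.toList gap) l.toList with he | he
    · rw [if_neg (by simpa using he), he]
      simp
    · have hd : decide (l.toList ≠ fixLine l.toList gap) = true := decide_eq_true (Ne.symm he)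
      rw [if_pos he, hd, if_pos rfl]
      push_cast
      ring

theorem process_lines_compact_spec : Claim_equal_process_lines_compact := by
  intro lines min_gap _
  show process_lines_compact lines min_gap = process_lines_compact_alt lines min_gap
  have h1 : process_lines_compact lines min_gap
      = lines.foldl (stepA (List.replicate min_gap.toNat ' ')) ([], 0) := rfl
  rw [h1, foldA]
  simp [process_lines_compact_alt]
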